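-- pv_equiv track=rewrite | github.com/gurnameh-99/latexract | latex_patterns.py | remove_latex_comments
-- ===== SOURCE A (Python) =====
-- def remove_latex_comments(content):
--     """Remove LaTeX comments from the content while preserving all other LaTeX expressions"""
--     # Split into lines and process each line
--     lines = content.split('\n')
--     cleaned_lines = []
--
--     for line in lines:
--         # Skip empty lines
--         if not line.strip():
--             cleaned_lines.append(line)
--             continue
--
--         # Handle escaped percent signs
--         line = line.replace('\\%', '__PERCENT__')
--
--         # Find comment position
--         comment_pos = line.find('%')
--
--         # Only remove the comment if % is not escaped
--         if comment_pos != -1: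
--             line = line[:comment_pos]
--
--         # Restore escaped percent signs
--         line = line.replace('__PERCENT__', '\\%')
--         cleaned_lines.append(line)
--
--     return '\n'.join(cleaned_lines)
-- ===== SOURCE B (Python) =====
-- def remove_latex_comments(content):
--     """Remove LaTeX comments: one left-to-right scan per line, no sentinel round-trip."""
--     out = []
--     for line in content.split('\n'):
--         kept = []
--         i = 0
--         n = len(line)
--         while i < n:
--             if line.startswith('\\%', i):
--                 kept.append('\\%')
--                 i += 2
--             elif line[i] == '%':
--                 break
--             else:
--                 kept.append(line[i])
--                 i += 1
--         out.append(''.join(kept) if i < n else line)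
--     return '\n'.join(out)
-- ===== Notes on version B (the rewrite author's own statement) =====
-- stated objective: simpler
-- what changed: B replaces A's sentinel round-trip (replace escaped percents with the sentinel '__PERCENT__', find the first percent, truncate, replace the sentinel back) by a single direct left-to-right scan per line that copies characters, consumes escaped-percent pairs, and stops at the first unescaped percent.
-- intended difference: On inputs containing A's sentinel text '__PERCENT__' (or the variants '__PERCENT\%' and '__PERCENT_\%', whose trailing escaped percent completes the sentinel during A's replace step), A's restore step can collapse that text into an escaped percent sign (sentinel collision); B returns the text unchanged, which is the intended behaviour. — e.g. on remove_latex_comments("__PERCENT__"): A returns "\\%", B returns "__PERCENT__"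
import Mathlib
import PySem

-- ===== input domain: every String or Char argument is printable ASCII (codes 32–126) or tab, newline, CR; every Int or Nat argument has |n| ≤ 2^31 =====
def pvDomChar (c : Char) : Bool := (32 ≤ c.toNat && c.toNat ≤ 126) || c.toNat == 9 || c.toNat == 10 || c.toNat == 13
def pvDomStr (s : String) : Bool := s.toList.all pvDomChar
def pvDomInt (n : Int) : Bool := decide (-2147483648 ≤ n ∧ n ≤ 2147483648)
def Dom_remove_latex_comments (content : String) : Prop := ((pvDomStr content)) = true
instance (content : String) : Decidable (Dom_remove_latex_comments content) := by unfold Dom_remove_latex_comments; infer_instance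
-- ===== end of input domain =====

-- B replaces A's sentinel replace/find/replace round-trip with one direct left-to-right scan per
-- line (objective: simpler); return-value equivalence only, neither program mutates its argument.

-- ===== PORT A =====
-- the sentinel string '__PERCENT__' of A, as a character list
def pvSent : List Char := ['_', '_', 'P', 'E', 'R', 'C', 'E', 'N', 'T', '_', '_']

def remove_latex_comments (content : String) : String :=
  let lines := PySem.Chars.splitOn content.toList ['\n']
  let cleaned := lines.map (fun line =>
    if (PySem.Chars.strip line).isEmpty then line
    else
      let line1 := PySem.Chars.replace line ['\\', '%'] pvSent
      let p := PySem.Chars.find line1 ['%']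
      let line2 := if p ≠ -1 then PySem.Chars.slice line1 none (some p) else line1
      PySem.Chars.replace line2 pvSent ['\\', '%'])
  String.ofList (PySem.Chars.join ['\n'] cleaned)

-- ===== PORT B =====
-- Source B's inner while loop: consume an escaped percent as a pair, stop at a bare percent sign,
-- else copy one character
def cutLine : List Char → List Char
  | [] => []
  | [c] => if c = '%' then [] else [c]
  | c1 :: c2 :: t =>
    if c1 = '\\' ∧ c2 = '%' then '\\' :: '%' :: cutLine t
    else if c1 = '%' then []
    else c1 :: cutLine (c2 :: t)

def remove_latex_comments_alt (content : String) : String :=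
  String.ofList (PySem.Chars.join ['\n']
    ((PySem.Chars.splitOn content.toList ['\n']).map cutLine))

-- ===== PRECONDITION & SPEC =====
-- On inputs containing A's sentinel text '__PERCENT__' (or the variants '__PERCENT\%' and
-- '__PERCENT_\%', whose trailing escaped percent completes the sentinel during A's replace step),
-- A's restore step can collapse that text into an escaped percent sign (a sentinel collision);
-- B returns the text unchanged, which is the intended behaviour.
def D_remove_latex_comments (content : String) : Prop :=
  ∃ p ∈ ["__PERCENT__", "__PERCENT\\%", "__PERCENT_\\%"], p.toList <:+: content.toList

instance (content : String) : Decidable (D_remove_latex_comments content) := by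
  unfold D_remove_latex_comments; infer_instance

def Spec_remove_latex_comments (content : String) (out : String) : Prop :=
  ¬ D_remove_latex_comments content → out = remove_latex_comments_alt content
instance (content : String) (out : String) : Decidable (Spec_remove_latex_comments content out) := by
  unfold Spec_remove_latex_comments; infer_instance

def pvDiffWitness_remove_latex_comments : String := "__PERCENT__"
def pvDiffWitnessOut_remove_latex_comments : String × String := ("\\%", "__PERCENT__")

-- ===== CLAIM (what is proved, stated in full; the proofs are below) =====
def Claim_unchanged_remove_latex_comments : Prop := ∀ (content : String), Dom_remove_latex_comments content → Spec_remove_latex_comments content (remove_latex_comments content)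
def Claim_changed_remove_latex_comments : Prop := Dom_remove_latex_comments (pvDiffWitness_remove_latex_comments) ∧ D_remove_latex_comments (pvDiffWitness_remove_latex_comments) ∧ remove_latex_comments (pvDiffWitness_remove_latex_comments) = pvDiffWitnessOut_remove_latex_comments.1 ∧ remove_latex_comments_alt (pvDiffWitness_remove_latex_comments) = pvDiffWitnessOut_remove_latex_comments.2 ∧ pvDiffWitnessOut_remove_latex_comments.1 ≠ pvDiffWitnessOut_remove_latex_comments.2

-- ===== LEMMAS AND PROOFS =====

-- the two composite patterns of D_remove_latex_comments, as character lists (proof-side names)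
def pvPat2 : List Char := ['_', '_', 'P', 'E', 'R', 'C', 'E', 'N', 'T', '\\', '%']
def pvPat3 : List Char := ['_', '_', 'P', 'E', 'R', 'C', 'E', 'N', 'T', '_', '\\', '%']

theorem pat1_eq : "__PERCENT__".toList = pvSent := by decide
theorem pat2_eq : "__PERCENT\\%".toList = pvPat2 := by decide
theorem pat3_eq : "__PERCENT_\\%".toList = pvPat3 := by decide

-- none of the three collision patterns occurs in the line
def NoPat (l : List Char) : Prop := ¬ pvSent <:+: l ∧ ¬ pvPat2 <:+: l ∧ ¬ pvPat3 <:+: l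

theorem noPat_tail (c : Char) (t : List Char) (h : NoPat (c :: t)) : NoPat t :=
  ⟨fun hi => h.1 (hi.trans (List.suffix_cons c t).isInfix),
   fun hi => h.2.1 (hi.trans (List.suffix_cons c t).isInfix),
   fun hi => h.2.2 (hi.trans (List.suffix_cons c t).isInfix)⟩

-- A's first replace (escaped percent → sentinel), as a structural recursion
def encL : List Char → List Char
  | [] => []
  | [c] => [c]
  | c1 :: c2 :: t =>
    if c1 = '\\' ∧ c2 = '%' then pvSent ++ encL t else c1 :: encL (c2 :: t)

-- A's second replace (sentinel → escaped percent), as a structural recursion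
def decL : List Char → List Char
  | [] => []
  | c :: t =>
    if pvSent.isPrefixOf (c :: t) then '\\' :: '%' :: decL (t.drop 10) else c :: decL t
termination_by l => l.length
decreasing_by all_goals simp

-- A's truncation at the first percent sign (on the sentinel-encoded line)
def truncP (r : List Char) : List Char :=
  if '%' ∈ r then r.take (r.findIdx (· = '%')) else r

theorem encL_cons_not (c : Char) (t : List Char) (h : ¬ ['\\', '%'] <+: c :: t) :
    encL (c :: t) = c :: encL t := by
  cases t with
  | nil => simp [encL]
  | cons c2 t' =>
    rw [encL, if_neg]
    intro hc
    exact h (by simp [List.cons_prefix_cons, hc.1, hc.2])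

theorem replace_go_enc (fuel : Nat) : ∀ (l acc : List Char), l.length ≤ fuel →
    PySem.Chars.replace.go ['\\', '%'] pvSent fuel l acc = acc.reverse ++ encL l := by
  induction fuel with
  | zero =>
    intro l acc h
    have hl : l = [] := List.eq_nil_of_length_eq_zero (by omega)
    subst hl; simp [PySem.Chars.replace.go, encL]
  | succ fuel ih =>
    intro l acc h
    cases l with
    | nil => simp [PySem.Chars.replace.go, encL]
    | cons c t =>
      rw [PySem.Chars.replace.go]
      by_cases hp : ['\\', '%'] <+: c :: t
      · rw [if_pos (List.isPrefixOf_iff_prefix.mpr hp)]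
        obtain ⟨r, hr⟩ := hp
        have hc : c = '\\' := by cases hr; rfl
        have ht : t = '%' :: r := by cases hr; rfl
        subst hc; subst ht
        rw [ih _ _ (by simp at h ⊢; omega)]
        simp [encL]
      · rw [if_neg (by simpa using (fun hh => hp (List.isPrefixOf_iff_prefix.mp hh)))]
        rw [ih _ _ (by simp at h ⊢; omega)]
        rw [encL_cons_not c t hp]
        simp

theorem replace_enc (l : List Char) : PySem.Chars.replace l ['\\', '%'] pvSent = encL l := by
  rw [PySem.Chars.replace, if_neg (by simp)]
  simpa using replace_go_enc l.length l [] le_rfl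

theorem replace_go_dec (fuel : Nat) : ∀ (l acc : List Char), l.length ≤ fuel →
    PySem.Chars.replace.go pvSent ['\\', '%'] fuel l acc = acc.reverse ++ decL l := by
  induction fuel with
  | zero =>
    intro l acc h
    have hl : l = [] := List.eq_nil_of_length_eq_zero (by omega)
    subst hl; simp [PySem.Chars.replace.go, decL]
  | succ fuel ih =>
    intro l acc h
    cases l with
    | nil => simp [PySem.Chars.replace.go, decL]
    | cons c t =>
      rw [PySem.Chars.replace.go, decL]
      by_cases hp : pvSent.isPrefixOf (c :: t) = true
      · rw [if_pos hp, if_pos hp]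
        have hlen : 11 ≤ t.length + 1 :=
          le_trans (by rfl) (List.isPrefixOf_iff_prefix.mp hp).length_le
        rw [ih _ _ (by simp [pvSent] at h ⊢; omega)]
        have hdrop : List.drop pvSent.length (c :: t) = t.drop 10 := by
          simp [pvSent]
        rw [hdrop]
        simp
      · rw [if_neg hp, if_neg hp]
        rw [ih _ _ (by simp at h; omega)]
        simp

theorem replace_dec (l : List Char) : PySem.Chars.replace l pvSent ['\\', '%'] = decL l := by
  rw [PySem.Chars.replace, if_neg (by simp [pvSent])]
  simpa using replace_go_dec l.length l [] le_rfl

theorem find_go_pct (l : List Char) : ∀ (k : Nat),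
    PySem.Chars.find.go ['%'] l k =
      if '%' ∈ l then ((k + l.findIdx (· = '%') : Nat) : Int) else -1 := by
  induction l with
  | nil => intro k; simp [PySem.Chars.find.go]
  | cons c t ih =>
    intro k
    rw [PySem.Chars.find.go]
    by_cases hc : c = '%'
    · subst hc
      rw [if_pos (by simp [List.isPrefixOf_iff_prefix, List.cons_prefix_cons])]
      simp [List.findIdx_cons]
    · rw [if_neg (by simp [List.isPrefixOf_iff_prefix, List.cons_prefix_cons]; exact Ne.symm hc)]
      rw [ih]
      by_cases hm : '%' ∈ t
      · rw [if_pos hm, if_pos (by simp [hm])]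
        simp [List.findIdx_cons, hc]
        omega
      · rw [if_neg hm, if_neg (by simp [hm, Ne.symm hc])]

theorem find_pct (l : List Char) :
    PySem.Chars.find l ['%'] = if '%' ∈ l then ((l.findIdx (· = '%') : Nat) : Int) else -1 := by
  rw [PySem.Chars.find, find_go_pct]
  simp

theorem truncA_eq (l : List Char) :
    (if PySem.Chars.find l ['%'] ≠ -1
       then PySem.Chars.slice l none (some (PySem.Chars.find l ['%'])) else l) = truncP l := by
  rw [find_pct, truncP]
  by_cases hm : '%' ∈ l
  · rw [if_pos hm, if_pos hm, if_pos (by omega)]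
    rw [PySem.Chars.slice_eq_listSlice, PySem.List.slice_to_natCast]
  · rw [if_neg hm, if_neg hm, if_neg (by omega)]

theorem truncP_cons_pct (x : List Char) : truncP ('%' :: x) = [] := by
  simp [truncP, List.findIdx_cons]

theorem truncP_cons_ne (c : Char) (x : List Char) (hc : c ≠ '%') :
    truncP (c :: x) = c :: truncP x := by
  rw [truncP, truncP]
  by_cases hm : '%' ∈ x
  · rw [if_pos (by simp [hm]), if_pos hm]
    simp [List.findIdx_cons, hc]
  · rw [if_neg (by simp [hm, Ne.symm hc]), if_neg hm]

theorem truncP_append_noPct (s x : List Char) (h : '%' ∉ s) :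
    truncP (s ++ x) = s ++ truncP x := by
  induction s with
  | nil => simp
  | cons a s ih =>
    have ha : a ≠ '%' := fun hh => h (by simp [hh])
    rw [List.cons_append, truncP_cons_ne a _ ha, ih (fun hh => h (by simp [hh]))]
    rfl

theorem truncP_prefix (x : List Char) : truncP x <+: x := by
  rw [truncP]
  split
  · exact List.take_prefix _ _
  · exact List.prefix_refl _

theorem decL_sent_append (y : List Char) : decL (pvSent ++ y) = '\\' :: '%' :: decL y := by
  show decL ('_' :: (['_', 'P', 'E', 'R', 'C', 'E', 'N', 'T', '_', '_'] ++ y)) = _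
  rw [decL]
  rw [if_pos (show pvSent.isPrefixOf ('_' :: (['_', 'P', 'E', 'R', 'C', 'E', 'N', 'T', '_', '_'] ++ y)) = true
        from List.isPrefixOf_iff_prefix.mpr (List.prefix_append pvSent y))]
  rw [List.drop_left' (show (['_', 'P', 'E', 'R', 'C', 'E', 'N', 'T', '_', '_'] : List Char).length = 10 from rfl)]

theorem decL_cons_not_prefix (c : Char) (y : List Char) (h : ¬ pvSent <+: c :: y) :
    decL (c :: y) = c :: decL y := by
  rw [decL, if_neg (fun hh => h (List.isPrefixOf_iff_prefix.mp hh))]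

-- peeling the sentinel through encL: if the rest of the sentinel is a prefix of encL l,
-- then l starts with the remaining literal text, possibly completed by an escaped '%'
theorem peel (l : List Char) : ∀ (k : Nat), 1 ≤ k → k ≤ 11 →
    (∃ r, pvSent.drop k ++ r = encL l) →
    (pvSent.drop k <+: l) ∨
    (∃ j, k + j = 9 ∧ ((pvSent.drop k).take j ++ ['\\', '%']) <+: l) ∨
    (∃ j, k + j = 10 ∧ ((pvSent.drop k).take j ++ ['\\', '%']) <+: l) := by
  induction l using encL.induct with
  | case1 =>
    intro k hk1 hk11 ⟨r, hr⟩
    left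
    have : pvSent.drop k = [] := by
      have := congrArg List.length hr
      simp [encL] at this
      exact List.eq_nil_of_length_eq_zero (by simp [pvSent] at this ⊢; omega)
    simp [this]
  | case2 c =>
    intro k hk1 hk11 ⟨r, hr⟩
    left
    have hlen : (pvSent.drop k).length + r.length = 1 := by
      have := congrArg List.length hr
      simpa [encL] using this
    have hk : k = 10 ∨ k = 11 := by simp [pvSent] at hlen; omega
    rcases hk with hk | hk
    · subst hk
      simp [pvSent, encL] at hr ⊢
      obtain ⟨h1, h2⟩ := hr
      exact h1
    · subst hk
      have hnil : pvSent.drop 11 = [] := by decide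
      rw [hnil]
      exact List.nil_prefix
  | case3 c1 c2 t hif ih =>
    intro k hk1 hk11 ⟨r, hr⟩
    obtain ⟨hc1, hc2⟩ := hif
    subst hc1; subst hc2
    rw [encL, if_pos ⟨rfl, rfl⟩] at hr
    by_cases hk : k = 11
    · left; subst hk
      have hnil : pvSent.drop 11 = [] := by decide
      rw [hnil]
      exact List.nil_prefix
    · have hpre : pvSent.drop k <+: pvSent :=
        List.prefix_of_prefix_length_le ⟨r, hr⟩ (List.prefix_append _ _) (by simp [pvSent])
      have hk910 : k = 9 ∨ k = 10 := by
        interval_cases k <;> first | omega | (exfalso; revert hpre; decide)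
      rcases hk910 with hk | hk
      · right; left
        exact ⟨0, by omega, by subst hk; simp [List.cons_prefix_cons]⟩
      · right; right
        exact ⟨0, by omega, by subst hk; simp [List.cons_prefix_cons]⟩
  | case4 c1 c2 t hif ih =>
    intro k hk1 hk11 ⟨r, hr⟩
    rw [encL, if_neg hif] at hr
    by_cases hk : k = 11
    · left; subst hk
      have hnil : pvSent.drop 11 = [] := by decide
      rw [hnil]
      exact List.nil_prefix
    · have hklt : k < 11 := by omega
      have hdk : pvSent.drop k = pvSent[k] :: pvSent.drop (k + 1) :=
        List.drop_eq_getElem_cons (by simp [pvSent]; omega)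
      rw [hdk, List.cons_append] at hr
      have hc1 : pvSent[k] = c1 := ((List.cons.injEq _ _ _ _).mp hr).1
      have hrest : ∃ r', pvSent.drop (k + 1) ++ r' = encL (c2 :: t) :=
        ⟨r, ((List.cons.injEq _ _ _ _).mp hr).2⟩
      rcases ih (k + 1) (by omega) (by omega) hrest with h1 | ⟨j, hj, h2⟩ | ⟨j, hj, h2⟩
      · left
        rw [hdk, hc1]
        exact List.cons_prefix_cons.mpr ⟨rfl, h1⟩
      · right; left
        refine ⟨j + 1, by omega, ?_⟩
        rw [hdk, hc1, List.take_succ_cons, List.cons_append]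
        exact List.cons_prefix_cons.mpr ⟨rfl, h2⟩
      · right; right
        refine ⟨j + 1, by omega, ?_⟩
        rw [hdk, hc1, List.take_succ_cons, List.cons_append]
        exact List.cons_prefix_cons.mpr ⟨rfl, h2⟩

theorem prefix_cases (l : List Char) (h : ¬ ['\\', '%'] <+: l) (hS : pvSent <+: encL l) :
    pvSent <+: l ∨ pvPat2 <+: l ∨ pvPat3 <+: l := by
  cases l with
  | nil => exfalso; have := hS.length_le; simp [encL, pvSent] at this
  | cons c t =>
    have henc : encL (c :: t) = c :: encL t := encL_cons_not c t h
    rw [henc] at hS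
    have hc : c = '_' ∧ pvSent.drop 1 <+: encL t := by
      have := List.cons_prefix_cons.mp hS
      exact ⟨this.1.symm, this.2⟩
    obtain ⟨rfl, hrest⟩ := hc
    obtain ⟨r, hr⟩ := hrest
    rcases peel t 1 le_rfl (by omega) ⟨r, hr⟩ with h1 | ⟨j, hj, h2⟩ | ⟨j, hj, h2⟩
    · left
      exact List.cons_prefix_cons.mpr ⟨rfl, h1⟩
    · right; left
      have hj8 : j = 8 := by omega
      subst hj8
      have : pvPat2 = '_' :: ((pvSent.drop 1).take 8 ++ ['\\', '%']) := by decide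
      rw [this]
      exact List.cons_prefix_cons.mpr ⟨rfl, h2⟩
    · right; right
      have hj9 : j = 9 := by omega
      subst hj9
      have : pvPat3 = '_' :: ((pvSent.drop 1).take 9 ++ ['\\', '%']) := by decide
      rw [this]
      exact List.cons_prefix_cons.mpr ⟨rfl, h2⟩

theorem main_line (l : List Char) (h : NoPat l) :
    decL (truncP (encL l)) = cutLine l := by
  induction l using cutLine.induct with
  | case1 => simp [encL, truncP, decL, cutLine]
  | case2 =>
    rw [show encL ['%'] = ['%'] from rfl, truncP_cons_pct]
    simp [decL, cutLine]
  | case3 c hc =>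
    rw [show encL [c] = [c] from rfl, truncP_cons_ne c [] hc,
      show truncP [] = [] from rfl,
      decL_cons_not_prefix c [] (fun hp => by have := hp.length_le; simp [pvSent] at this)]
    simp [decL, cutLine, hc]
  | case4 c1 c2 t hif ih =>
    obtain ⟨rfl, rfl⟩ := hif
    rw [encL, if_pos ⟨rfl, rfl⟩]
    rw [truncP_append_noPct _ _ (by decide), decL_sent_append]
    rw [cutLine, if_pos ⟨rfl, rfl⟩]
    rw [ih (noPat_tail _ _ (noPat_tail _ _ h))]
  | case5 c2 t hif =>
    rw [encL, if_neg hif, truncP_cons_pct]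
    rw [cutLine, if_neg hif, if_pos rfl]
    rw [decL]
  | case6 c1 c2 t hif hc1 ih =>
    rw [encL, if_neg hif, truncP_cons_ne c1 _ hc1]
    by_cases hp : pvSent <+: c1 :: truncP (encL (c2 :: t))
    · exfalso
      have hp2 : pvSent <+: encL (c1 :: c2 :: t) := by
        rw [encL, if_neg hif]
        exact hp.trans (List.cons_prefix_cons.mpr ⟨rfl, truncP_prefix _⟩)
      have hnp : ¬ ['\\', '%'] <+: c1 :: c2 :: t := by
        intro hpp
        obtain ⟨h1, h2⟩ := List.cons_prefix_cons.mp hpp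
        obtain ⟨h3, _⟩ := List.cons_prefix_cons.mp h2
        exact hif ⟨h1.symm, h3.symm⟩
      rcases prefix_cases _ hnp hp2 with hq | hq | hq
      · exact h.1 hq.isInfix
      · exact h.2.1 hq.isInfix
      · exact h.2.2 hq.isInfix
    · rw [decL_cons_not_prefix c1 _ hp]
      rw [cutLine, if_neg hif, if_neg hc1]
      rw [ih (noPat_tail _ _ h)]

theorem strip_nil_no_pct (l : List Char) (h : (PySem.Chars.strip l).isEmpty = true) :
    '%' ∉ l := by
  intro hm
  rw [List.isEmpty_iff] at h
  unfold PySem.Chars.strip PySem.Chars.rstrip PySem.Chars.lstrip at h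
  have h1 : ∀ c ∈ List.dropWhile PySem.Chars.isspace l, PySem.Chars.isspace c = true := by
    intro c hc
    have h0 := List.reverse_eq_nil_iff.mp h
    exact List.dropWhile_eq_nil_iff.mp h0 c (by simpa using hc)
  have h2 : ∀ c ∈ l, PySem.Chars.isspace c = true := by
    intro c hc
    rw [← List.takeWhile_append_dropWhile (p := PySem.Chars.isspace) (l := l)] at hc
    rcases List.mem_append.mp hc with h3 | h3
    · exact List.mem_takeWhile_imp h3
    · exact h1 c h3
  have := h2 '%' hm
  exact absurd this (by decide)

theorem splitOn_go_infix (sep s : List Char) : ∀ (fuel : Nat) (l cur : List Char)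
    (acc : List (List Char)), (∀ x ∈ acc, x <:+: s) → cur.reverse ++ l <:+: s →
    ∀ cs ∈ PySem.Chars.splitOn.go sep fuel l cur acc, cs <:+: s := by
  intro fuel
  induction fuel with
  | zero =>
    intro l cur acc hacc hcur cs hcs
    rw [PySem.Chars.splitOn.go] at hcs
    simp at hcs
    rcases hcs with hcs | hcs
    · exact hacc cs hcs
    · subst hcs; exact hcur
  | succ fuel ih =>
    intro l cur acc hacc hcur cs hcs
    cases l with
    | nil =>
      rw [PySem.Chars.splitOn.go] at hcs
      · simp at hcs
        rcases hcs with hcs | hcs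
        · exact hacc cs hcs
        · subst hcs; simpa using hcur
      · omega
    | cons c rest =>
      rw [PySem.Chars.splitOn.go] at hcs
      split at hcs
      · refine ih _ _ _ ?_ ?_ cs hcs
        · intro x hx
          rcases List.mem_cons.mp hx with hx | hx
          · subst hx
            exact ((List.prefix_append cur.reverse (c :: rest)).isInfix).trans hcur
          · exact hacc x hx
        · exact (((List.drop_suffix _ _).isInfix).trans
            ((List.suffix_append cur.reverse (c :: rest)).isInfix)).trans hcur
      · refine ih _ _ _ hacc ?_ cs hcs
        simpa using hcur

theorem splitOn_infix (s sep : List Char) :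
    ∀ cs ∈ PySem.Chars.splitOn s sep, cs <:+: s := by
  intro cs hcs
  exact splitOn_go_infix sep s _ s [] [] (by simp) (by simp) cs hcs

theorem cut_no_pct (l : List Char) (h : '%' ∉ l) : cutLine l = l := by
  induction l using cutLine.induct with
  | case1 => rfl
  | case2 => exact absurd (by simp) h
  | case3 c hc => simp [cutLine, hc]
  | case4 c1 c2 t hif ih => exact absurd (by simp [hif.2]) h
  | case5 c2 t hif => exact absurd (by simp) h
  | case6 c1 c2 t hif hc1 ih =>
    rw [cutLine, if_neg hif, if_neg hc1, ih (fun hm => h (by simp [hm]))]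

-- a fast decision procedure for D_remove_latex_comments (the default List-infix instance
-- recurses too deeply for large inputs); proved equivalent, registered as an instance below
def pvHasPat (s : List Char) : Bool :=
  s.tails.any (fun t =>
    (["__PERCENT__", "__PERCENT\\%", "__PERCENT_\\%"]).any (fun p => p.toList.isPrefixOf t))

theorem pvHasPat_iff (s : List Char) : pvHasPat s = true ↔
    ∃ p ∈ (["__PERCENT__", "__PERCENT\\%", "__PERCENT_\\%"] : List String), p.toList <:+: s := by
  unfold pvHasPat
  simp only [List.any_eq_true, List.mem_tails, List.isPrefixOf_iff_prefix]
  constructor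
  · rintro ⟨t, hts, p, hp, hpt⟩
    exact ⟨p, hp, List.infix_iff_prefix_suffix.mpr ⟨t, hpt, hts⟩⟩
  · rintro ⟨p, hp, hinf⟩
    obtain ⟨t, hpt, hts⟩ := List.infix_iff_prefix_suffix.mp hinf
    exact ⟨t, hts, p, hp, hpt⟩

instance (content : String) : Decidable (D_remove_latex_comments content) :=
  decidable_of_iff (pvHasPat content.toList = true)
    (by unfold D_remove_latex_comments; exact pvHasPat_iff content.toList)

-- ===== VERDICT (by name: the statement is the Claim_ definition above) =====
theorem remove_latex_comments_spec : Claim_unchanged_remove_latex_comments := by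
  intro content _
  unfold Spec_remove_latex_comments
  intro hD
  unfold remove_latex_comments remove_latex_comments_alt
  simp only []
  refine congrArg _ (congrArg _ (List.map_congr_left ?_))
  intro line hline
  have hinf : line <:+: content.toList := splitOn_infix _ _ line hline
  have hnd : NoPat line :=
    ⟨fun hi => hD ⟨"__PERCENT__", by simp, (by simpa [pat1_eq] using hi : _ <:+: line).trans hinf⟩,
     fun hi => hD ⟨"__PERCENT\\%", by simp, (by simpa [pat2_eq] using hi : _ <:+: line).trans hinf⟩,
     fun hi => hD ⟨"__PERCENT_\\%", by simp, (by simpa [pat3_eq] using hi : _ <:+: line).trans hinf⟩⟩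
  by_cases hs : (PySem.Chars.strip line).isEmpty = true
  · rw [if_pos hs]
    exact (cut_no_pct line (strip_nil_no_pct line hs)).symm
  · rw [if_neg hs, replace_enc, truncA_eq, replace_dec]
    exact main_line line hnd

theorem remove_latex_comments_changed : Claim_changed_remove_latex_comments := by
  unfold Claim_changed_remove_latex_comments; decide
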